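-- pv_equiv track=rewrite | github.com/systemsvanguard/leetSpeakGenerator | l33tSpeakGenerator.py | convert2L33t
-- ===== SOURCE A (Python) =====
-- def convert2L33t(myString):
-- 	l33tcode = (
-- 		(('a', 'A'), '4'),
-- 		(('e', 'E'), '3'),
-- 		(('i', 'I'), '1'),
-- 		(('o', 'O'), '0'),
-- 		(('s', 'S'), '5'),
-- 		(('t', 'T'), '7'),
-- 		(('b', 'B'), '5'),
-- 		(('d', 'D'), '5'),
-- 		)
-- 	for symbols, replaceStr in l33tcode:
-- 		for symbol in symbols:
-- 			myString = myString.replace(symbol, replaceStr)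
-- 	return myString
-- ===== SOURCE B (Python) =====
-- def convert2L33t(myString):
-- 	table = str.maketrans('aAeEiIoOsStTbBdD', '4433110055775555')
-- 	return myString.translate(table)
-- ===== Notes on version B (the rewrite author's own statement) =====
-- stated objective: idiomatic
-- what changed: Replaced sixteen sequential full-string .replace passes with a single character-by-character pass through a translation table built once with str.maketrans/str.translate.
import Mathlib
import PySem

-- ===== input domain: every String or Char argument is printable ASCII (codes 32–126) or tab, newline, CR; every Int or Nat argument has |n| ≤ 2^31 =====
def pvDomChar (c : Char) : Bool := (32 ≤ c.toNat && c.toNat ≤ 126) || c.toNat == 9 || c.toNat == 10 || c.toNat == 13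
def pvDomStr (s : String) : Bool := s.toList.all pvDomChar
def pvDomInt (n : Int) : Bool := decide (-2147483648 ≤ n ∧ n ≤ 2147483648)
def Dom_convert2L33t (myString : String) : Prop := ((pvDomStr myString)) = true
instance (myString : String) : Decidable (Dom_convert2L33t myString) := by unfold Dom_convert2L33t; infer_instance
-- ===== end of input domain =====

-- B replaces A's sixteen sequential full-string .replace passes by one pass over the
-- characters driven by a translation table (str.maketrans/str.translate); same result, more idiomatic.

-- ===== PORT A =====
-- A's tuple of ((lower, upper), digit) rules, and the body of A's outer loop as a helper.
def convert2L33tRules : List ((Char × Char) × Char) :=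
  [(('a', 'A'), '4'), (('e', 'E'), '3'), (('i', 'I'), '1'), (('o', 'O'), '0'),
   (('s', 'S'), '5'), (('t', 'T'), '7'), (('b', 'B'), '5'), (('d', 'D'), '5')]

-- inner 'for symbol in symbols': two replace calls in order
def convert2L33tStep (s : String) (rule : (Char × Char) × Char) : String :=
  let s := PySem.Str.replace s (String.ofList [rule.1.1]) (String.ofList [rule.2])
  PySem.Str.replace s (String.ofList [rule.1.2]) (String.ofList [rule.2])

def convert2L33t (myString : String) : String :=
  convert2L33tRules.foldl convert2L33tStep myString

-- ===== PORT B =====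
-- str.maketrans('aAeEiIoOsStTbBdD', '4433110055775555') as a Char -> Char dict
def convert2L33tTable : PySem.Dict Char Char :=
  PySem.Dict.ofList (List.zip "aAeEiIoOsStTbBdD".toList "4433110055775555".toList)

-- myString.translate(table): one pass, each character looked up, kept if absent
def convert2L33t_alt (myString : String) : String :=
  String.ofList (myString.toList.map (fun c => convert2L33tTable.getD c c))

-- ===== PRECONDITION & SPEC =====
def Spec_convert2L33t (myString : String) (out : String) : Prop := out = convert2L33t_alt myString
instance (myString : String) (out : String) : Decidable (Spec_convert2L33t myString out) := by unfold Spec_convert2L33t; infer_instance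

-- ===== CLAIM (what is proved, stated in full; the proofs are below) =====
def Claim_equal_convert2L33t : Prop := ∀ (myString : String), Dom_convert2L33t myString → Spec_convert2L33t myString (convert2L33t myString)

-- ===== LEMMAS AND PROOFS =====

-- substituting one character, as a per-character function
def pvSubst (a b c : Char) : Char := if c = a then b else c

-- the whole rule list, as a per-character function
def pvApplyAll (rs : List ((Char × Char) × Char)) (c : Char) : Char :=
  rs.foldl (fun c r => pvSubst r.1.2 r.2 (pvSubst r.1.1 r.2 c)) c

theorem replace_go_single (a b : Char) (l acc : List Char) (fuel : Nat)
    (h : l.length ≤ fuel) :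
    PySem.Chars.replace.go [a] [b] fuel l acc = acc.reverse ++ l.map (pvSubst a b) := by
  induction l generalizing fuel acc with
  | nil => cases fuel <;> simp [PySem.Chars.replace.go]
  | cons c t ih =>
    cases fuel with
    | zero => simp at h
    | succ n =>
      simp only [PySem.Chars.replace.go]
      by_cases hc : c = a
      · subst hc
        simp only [List.isPrefixOf, BEq.rfl, Bool.true_and, if_true,
          List.length_singleton, List.drop_succ_cons, List.drop_zero, List.reverse_singleton,
          List.singleton_append]
        rw [ih (b :: acc) n (by simpa using h)]
        simp [pvSubst]
      · have hb : ([a].isPrefixOf (c :: t)) = false := by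
          simp [List.isPrefixOf]
          exact fun h' => hc (by simpa using h'.symm)
        rw [hb]
        simp only [Bool.false_eq_true, if_false]
        rw [ih (c :: acc) n (by simpa using Nat.le_of_succ_le_succ h)]
        simp [pvSubst, hc]

theorem replace_single (a b : Char) (l : List Char) :
    PySem.Chars.replace l [a] [b] = l.map (pvSubst a b) := by
  rw [PySem.Chars.replace, if_neg (by simp)]
  exact replace_go_single a b l [] l.length (le_refl _)

theorem str_replace_single (a b : Char) (s : String) :
    PySem.Str.replace s (String.ofList [a]) (String.ofList [b]) =
      String.ofList (s.toList.map (pvSubst a b)) := by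
  rw [PySem.Str.replace, String.toList_ofList, String.toList_ofList, replace_single]

theorem foldl_rules (rs : List ((Char × Char) × Char)) (s : String) :
    rs.foldl convert2L33tStep s = String.ofList (s.toList.map (pvApplyAll rs)) := by
  induction rs generalizing s with
  | nil =>
    simp only [List.foldl_nil, show pvApplyAll [] = id from rfl, List.map_id, String.ofList_toList]
  | cons r t ih =>
    rw [List.foldl_cons, ih]
    show String.ofList (((convert2L33tStep s r)).toList.map (pvApplyAll t)) = _
    rw [convert2L33tStep, str_replace_single, str_replace_single, String.toList_ofList,
      String.toList_ofList, List.map_map, List.map_map]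
    rfl

theorem table_eq (c : Char) :
    convert2L33tTable.getD c c = pvApplyAll convert2L33tRules c := by
  by_cases h1 : c = 'a'; · subst h1; decide
  by_cases h2 : c = 'A'; · subst h2; decide
  by_cases h3 : c = 'e'; · subst h3; decide
  by_cases h4 : c = 'E'; · subst h4; decide
  by_cases h5 : c = 'i'; · subst h5; decide
  by_cases h6 : c = 'I'; · subst h6; decide
  by_cases h7 : c = 'o'; · subst h7; decide
  by_cases h8 : c = 'O'; · subst h8; decide
  by_cases h9 : c = 's'; · subst h9; decide
  by_cases h10 : c = 'S'; · subst h10; decide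
  by_cases h11 : c = 't'; · subst h11; decide
  by_cases h12 : c = 'T'; · subst h12; decide
  by_cases h13 : c = 'b'; · subst h13; decide
  by_cases h14 : c = 'B'; · subst h14; decide
  by_cases h15 : c = 'd'; · subst h15; decide
  by_cases h16 : c = 'D'; · subst h16; decide
  have L : convert2L33tTable.getD c c = c := by
    simp [convert2L33tTable, PySem.Dict.getD, PySem.Dict.get?, PySem.Dict.ofList, PySem.Dict.empty,
      PySem.Dict.insert, PySem.Dict.update, beq_eq_false_iff_ne.mpr (fun h => h1 h.symm), beq_eq_false_iff_ne.mpr (fun h => h2 h.symm), beq_eq_false_iff_ne.mpr (fun h => h3 h.symm), beq_eq_false_iff_ne.mpr (fun h => h4 h.symm), beq_eq_false_iff_ne.mpr (fun h => h5 h.symm), beq_eq_false_iff_ne.mpr (fun h => h6 h.symm), beq_eq_false_iff_ne.mpr (fun h => h7 h.symm), beq_eq_false_iff_ne.mpr (fun h => h8 h.symm), beq_eq_false_iff_ne.mpr (fun h => h9 h.symm), beq_eq_false_iff_ne.mpr (fun h => h10 h.symm), beq_eq_false_iff_ne.mpr (fun h => h11 h.symm), beq_eq_false_iff_ne.mpr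 (fun h => h12 h.symm), beq_eq_false_iff_ne.mpr (fun h => h13 h.symm), beq_eq_false_iff_ne.mpr (fun h => h14 h.symm), beq_eq_false_iff_ne.mpr (fun h => h15 h.symm), beq_eq_false_iff_ne.mpr (fun h => h16 h.symm)]
  rw [L]
  simp [pvApplyAll, convert2L33tRules, pvSubst, h1, h2, h3, h4, h5, h6, h7, h8, h9, h10, h11, h12, h13, h14, h15, h16]

-- ===== VERDICT (by name: the statement is the Claim_ definition above) =====
theorem convert2L33t_spec : Claim_equal_convert2L33t := by
  intro s _
  show convert2L33t s = convert2L33t_alt s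
  rw [convert2L33t, foldl_rules, convert2L33t_alt]
  exact congrArg String.ofList (List.map_congr_left (fun c _ => (table_eq c).symm))
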